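-- pv_equiv track=rewrite | github.com/dario2994/pol2dom | p2d/generate_testlib_for_domjudge.py | replace_function
-- ===== SOURCE A (Python) =====
-- def replace_function(lines, function):
--     begin = function.splitlines()[0]
--     end = function.splitlines()[-1]
--
--     state = 0
--     new_lines = []
--     for line in lines:
--         if line == begin:
--             assert(state == 0)
--             state += 1
--         if state != 1:
--             new_lines.append(line)
--         if state == 1 and line == end:
--             state += 1
--             new_lines.append(function)
--     assert(state == 2)
--     return new_lines
-- ===== SOURCE B (Python) =====
-- def replace_function(lines, function):
--     parts = function.splitlines()
--     begin, end = parts[0], parts[-1]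
--     assert lines.count(begin) == 1
--     i = lines.index(begin)
--     j = i if begin == end else i + 1 + lines[i + 1:].index(end)
--     return lines[:i] + [function] + lines[j + 1:]
-- ===== Notes on version B (the rewrite author's own statement) =====
-- stated objective: simpler
-- what changed: Replaces A's stateful single pass (a 3-state machine appending line by line) with locate-and-splice: find the index of the begin line, find the first end line at or after it, and return lines[:i] + [function] + lines[j+1:].
import Mathlib
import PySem

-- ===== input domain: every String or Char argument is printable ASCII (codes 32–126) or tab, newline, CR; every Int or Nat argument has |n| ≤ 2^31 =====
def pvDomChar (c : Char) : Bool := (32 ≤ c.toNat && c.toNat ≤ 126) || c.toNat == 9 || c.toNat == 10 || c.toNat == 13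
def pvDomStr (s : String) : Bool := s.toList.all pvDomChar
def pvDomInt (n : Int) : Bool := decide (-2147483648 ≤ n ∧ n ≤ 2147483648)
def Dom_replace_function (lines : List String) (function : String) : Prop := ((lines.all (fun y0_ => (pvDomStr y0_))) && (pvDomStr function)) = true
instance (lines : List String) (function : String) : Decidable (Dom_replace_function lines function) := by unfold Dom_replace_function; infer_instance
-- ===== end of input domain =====

-- B replaces A's stateful single pass with locate-and-splice (index of begin, first end after it, list splice); objective: simpler.


-- ===== PORT A =====
-- one iteration of A's for-loop: state and new_lines accumulator, updated exactly as in the Python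
def pvAStep (begin_ end_ function : String) (st : Nat × List String) (line : String) : Nat × List String :=
  let state := if line = begin_ then st.1 + 1 else st.1
  let acc := if state ≠ 1 then st.2 ++ [line] else st.2
  if state = 1 ∧ line = end_ then (state + 1, acc ++ [function]) else (state, acc)

def replace_function (lines : List String) (function : String) : List String :=
  match PySem.Str.splitlines function with
  | [] => []   -- Python raises IndexError on splitlines()[0] here; excluded by Pre_
  | b :: bs =>
    let begin_ := b                       -- function.splitlines()[0]
    let end_ := (b :: bs).getLastD b  -- function.splitlines()[-1]; nonempty, default unused
    -- the asserts are no-ops on Pre_ (begin occurs once and end is found); outside Pre_ Python raises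
    (lines.foldl (pvAStep begin_ end_ function) (0, [])).2

-- ===== PORT B =====
def replace_function_alt (lines : List String) (function : String) : List String :=
  match PySem.Str.splitlines function with
  | [] => []   -- parts[0] raises IndexError; excluded by Pre_
  | b :: bs =>
    let end_ := (b :: bs).getLastD b  -- function.splitlines()[-1]; nonempty, default unused
    match PySem.List.index? lines b with
    | none => []   -- assert lines.count(begin) == 1 fails; excluded by Pre_
    | some i =>
      let j := if b = end_ then i
        else match PySem.List.index? (lines.drop (i + 1)) end_ with
          | none => i   -- lines[i+1:].index(end) raises ValueError; excluded by Pre_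
          | some k => i + 1 + k
      -- lines[:i] + [function] + lines[j+1:]  (i, j+1 are nonnegative, so take/drop are exact)
      lines.take i ++ [function] ++ lines.drop (j + 1)

-- ===== PRECONDITION & SPEC =====
-- Pre_: function has at least one line, its first line occurs exactly once in lines, and its last
-- line occurs at or after that occurrence — exactly the inputs on which A's asserts/indexing succeed.
def Pre_replace_function (lines : List String) (function : String) : Prop :=
  PySem.Str.splitlines function ≠ [] ∧
  lines.count ((PySem.Str.splitlines function).headI) = 1 ∧
  ((PySem.Str.splitlines function).getLastD "") ∈ lines.drop (lines.idxOf ((PySem.Str.splitlines function).headI))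
instance (lines : List String) (function : String) : Decidable (Pre_replace_function lines function) := by unfold Pre_replace_function; infer_instance

def pvWitness_replace_function : List String × String := (["x", "begin", "mid", "end", "y"], "begin\nnew body\nend")

def Spec_replace_function (lines : List String) (function : String) (out : List String) : Prop := out = replace_function_alt lines function
instance (lines : List String) (function : String) (out : List String) : Decidable (Spec_replace_function lines function out) := by unfold Spec_replace_function; infer_instance

-- ===== CLAIM (what is proved, stated in full; the proofs are below) =====
def Claim_equal_replace_function : Prop := ∀ (lines : List String) (function : String), Dom_replace_function lines function → Pre_replace_function lines function → Spec_replace_function lines function (replace_function lines function)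

-- ===== LEMMAS AND PROOFS =====

-- single-step reductions of A's loop body
theorem pvAStep_0 (b e f x : String) (acc : List String) (hxb : x ≠ b) :
    pvAStep b e f (0, acc) x = (0, acc ++ [x]) := by
  simp [pvAStep, hxb]

theorem pvAStep_2 (b e f x : String) (acc : List String) (hxb : x ≠ b) :
    pvAStep b e f (2, acc) x = (2, acc ++ [x]) := by
  simp [pvAStep, hxb]

theorem pvAStep_1_skip (b e f x : String) (acc : List String) (hxb : x ≠ b) (hxe : x ≠ e) :
    pvAStep b e f (1, acc) x = (1, acc) := by
  simp [pvAStep, hxb, hxe]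

theorem pvAStep_1_end (b e f : String) (acc : List String) (heb : e ≠ b) :
    pvAStep b e f (1, acc) e = (2, acc ++ [f]) := by
  simp [pvAStep, heb]

theorem pvAStep_begin (b e f : String) (acc : List String) :
    pvAStep b e f (0, acc) b = if b = e then (2, acc ++ [f]) else (1, acc) := by
  by_cases hbe : b = e <;> simp [pvAStep, hbe]

-- state 2: every remaining line is appended unchanged (begin does not reoccur)
theorem pvA_state2 (b e f : String) (l : List String) (acc : List String) (hb : b ∉ l) :
    l.foldl (pvAStep b e f) (2, acc) = (2, acc ++ l) := by
  induction l generalizing acc with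
  | nil => simp
  | cons x l ih =>
    have hxb : x ≠ b := fun h => hb (h ▸ List.mem_cons_self)
    have hbl : b ∉ l := fun h => hb (List.mem_cons_of_mem _ h)
    rw [List.foldl_cons, pvAStep_2 b e f x acc hxb, ih _ hbl]
    simp

-- state 1: lines are skipped up to the first end line, where function is appended
theorem pvA_state1 (b e f : String) (l : List String) (acc : List String)
    (hb : b ∉ l) (he : e ∈ l) :
    l.foldl (pvAStep b e f) (1, acc) = (2, acc ++ [f] ++ l.drop (l.idxOf e + 1)) := by
  induction l generalizing acc with
  | nil => cases he
  | cons x l ih =>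
    have hxb : x ≠ b := fun h => hb (h ▸ List.mem_cons_self)
    have hbl : b ∉ l := fun h => hb (List.mem_cons_of_mem _ h)
    by_cases hxe : x = e
    · rw [List.foldl_cons, hxe, pvAStep_1_end b e f acc (hxe ▸ hxb), pvA_state2 b e f l _ hbl]
      simp [List.idxOf_cons_self]
    · have hel : e ∈ l := by cases he with
        | head => exact absurd rfl hxe
        | tail _ h => exact h
      have hbeq : (x == e) = false := beq_eq_false_iff_ne.mpr hxe
      rw [List.foldl_cons, pvAStep_1_skip b e f x acc hxb hxe, ih _ hbl hel,
        List.idxOf_cons, hbeq, cond_false]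
      simp [List.drop_succ_cons]

-- state 0: lines before begin are appended unchanged
theorem pvA_state0 (b e f : String) (pre : List String) (acc : List String) (hb : b ∉ pre) :
    pre.foldl (pvAStep b e f) (0, acc) = (0, acc ++ pre) := by
  induction pre generalizing acc with
  | nil => simp
  | cons x l ih =>
    have hxb : x ≠ b := fun h => hb (h ▸ List.mem_cons_self)
    have hbl : b ∉ l := fun h => hb (List.mem_cons_of_mem _ h)
    rw [List.foldl_cons, pvAStep_0 b e f x acc hxb, ih _ hbl]
    simp

theorem pvIdxOf_append_cons {b : String} (pre suf : List String) (hb : b ∉ pre) :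
    (pre ++ b :: suf).idxOf b = pre.length := by
  rw [List.idxOf_append_of_notMem hb]
  simp [List.idxOf_cons_self]

-- index? of a present element is its idxOf
theorem pvIndex?_mem {l : List String} {e : String} (h : e ∈ l) :
    PySem.List.index? l e = some (l.idxOf e) := by
  obtain ⟨k, hk⟩ := Option.isSome_iff_exists.mp ((PySem.List.index?_isSome_iff l e).mpr h)
  obtain ⟨pre, suf, h1, h2, h3⟩ := (PySem.List.index?_eq_some_iff l e k).mp hk
  rw [hk, h1, pvIdxOf_append_cons pre suf h3, h2]

-- ===== VERDICT (by name: the statement is the Claim_ definition above) =====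
theorem replace_function_spec : Claim_equal_replace_function := by
  intro lines function _ hpre
  obtain ⟨hne, hcount, hmem⟩ := hpre
  unfold Spec_replace_function replace_function replace_function_alt
  cases hsp : PySem.Str.splitlines function with
  | nil => exact absurd hsp hne
  | cons b bs =>
    dsimp only
    rw [hsp] at hcount hmem
    simp only [List.headI, List.getLastD_cons] at hcount hmem
    set e := (b :: bs).getLastD b with he_def
    have hgl : bs.getLastD b = e := by rw [he_def, List.getLastD_cons]
    rw [hgl] at hmem
    -- decompose lines around the unique occurrence of b
    have hbmem : b ∈ lines := List.count_pos_iff.mp (by omega)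
    have hindex := pvIndex?_mem hbmem
    obtain ⟨pre, suf, hlines, hlen, hbpre⟩ :=
      (PySem.List.index?_eq_some_iff lines b _).mp hindex
    have hbsuf : b ∉ suf := by
      rw [hlines, List.count_append, List.count_cons_self] at hcount
      have h0 : pre.count b = 0 := List.count_eq_zero.mpr hbpre
      exact List.count_eq_zero.mp (by omega)
    have hidx : lines.idxOf b = pre.length := hlines ▸ pvIdxOf_append_cons pre suf hbpre
    rw [hidx] at hindex
    have hdrop : lines.drop (lines.idxOf b) = b :: suf := by
      rw [hidx, hlines, List.drop_append_of_le_length (le_refl _)]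
      simp
    rw [hdrop] at hmem
    have hdrop1 : lines.drop (pre.length + 1) = suf := by
      rw [hlines, show pre.length + 1 = (pre ++ [b]).length by simp,
        show pre ++ b :: suf = (pre ++ [b]) ++ suf by simp]
      exact List.drop_left
    have htake : lines.take pre.length = pre := by
      rw [hlines]; exact List.take_left
    rw [hindex]
    dsimp only
    by_cases hbe : b = e
    · -- begin line is also the end line: j = i
      have hfold : lines.foldl (pvAStep b e function) (0, []) =
          (2, pre ++ [function] ++ suf) := by
        rw [hlines, List.foldl_append, pvA_state0 b e function pre [] hbpre, List.foldl_cons,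
          pvAStep_begin, if_pos hbe, pvA_state2 b e function suf _ hbsuf]
        simp
      rw [hfold, if_pos hbe, htake, hdrop1]
    · have hesuf : e ∈ suf := (List.mem_cons.mp hmem).resolve_left (fun h => hbe h.symm)
      have hfold : lines.foldl (pvAStep b e function) (0, []) =
          (2, pre ++ [function] ++ suf.drop (suf.idxOf e + 1)) := by
        rw [hlines, List.foldl_append, pvA_state0 b e function pre [] hbpre, List.foldl_cons,
          pvAStep_begin, if_neg hbe, pvA_state1 b e function suf _ hbsuf hesuf]
        simp
      rw [hfold, if_neg hbe, hdrop1, pvIndex?_mem hesuf]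
      dsimp only
      rw [htake]
      have hd2 : ∀ k : Nat, lines.drop (pre.length + 1 + k) = suf.drop k := by
        intro k
        rw [← hdrop1, List.drop_drop]
      rw [show pre.length + 1 + suf.idxOf e + 1 = pre.length + 1 + (suf.idxOf e + 1) from by omega,
        hd2 (suf.idxOf e + 1)]
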